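-- pv_equiv track=rewrite | github.com/joeyxin-del/geo_IRSTD | trajectory_statistics.py | is_uniform_motion
-- ===== SOURCE A (Python) =====
-- def calculate_velocity(point1, point2):
--     """计算两点间的速度向量"""
--     return [point2[0] - point1[0], point2[1] - point1[1]]
--
-- def is_uniform_motion(points):
--     """验证是否为匀速直线运动
--
--     Args:
--         points: 轨迹上的点列表 [(x1,y1), (x2,y2), ...]
--     Returns:
--         bool: 是否是匀速直线运动
--     """
--     if len(points) < 3:
--         return True
--
--     # 计算相邻点之间的速度向量
--     velocities = []
--     for i in range(len(points)-1):
--         v = calculate_velocity(points[i], points[i+1])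
--         velocities.append(v)
--
--     # 检查速度是否恒定（允许小误差）
--     VELOCITY_THRESHOLD = 5.0  # 速度误差阈值
--     for i in range(len(velocities)-1):
--         diff_x = abs(velocities[i][0] - velocities[i+1][0])
--         diff_y = abs(velocities[i][1] - velocities[i+1][1])
--         if diff_x > VELOCITY_THRESHOLD or diff_y > VELOCITY_THRESHOLD:
--             return False
--
--     return True
-- ===== SOURCE B (Python) =====
-- def is_uniform_motion(points):
--     """验证是否为匀速直线运动: each coordinate sequence separately has steady steps
--     (adjacent step sizes change by at most 5), checked by a running-state scan."""
--     def steady(seq):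
--         ok = True
--         prev = None
--         prev_d = None
--         for v in seq:
--             if prev is not None:
--                 d = v - prev
--                 if prev_d is not None and abs(d - prev_d) > 5:
--                     ok = False
--                 prev_d = d
--             prev = v
--         return ok
--     return steady([p[0] for p in points]) and steady([p[1] for p in points])
-- ===== Notes on version B (the rewrite author's own statement) =====
-- stated objective: alternative
-- what changed: Instead of building a velocity-vector list and scanning adjacent pairs, B splits the points into two 1-D coordinate sequences and checks each independently with a running-state scan (previous value and previous step carried in an accumulator, no early exit).
import Mathlib
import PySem

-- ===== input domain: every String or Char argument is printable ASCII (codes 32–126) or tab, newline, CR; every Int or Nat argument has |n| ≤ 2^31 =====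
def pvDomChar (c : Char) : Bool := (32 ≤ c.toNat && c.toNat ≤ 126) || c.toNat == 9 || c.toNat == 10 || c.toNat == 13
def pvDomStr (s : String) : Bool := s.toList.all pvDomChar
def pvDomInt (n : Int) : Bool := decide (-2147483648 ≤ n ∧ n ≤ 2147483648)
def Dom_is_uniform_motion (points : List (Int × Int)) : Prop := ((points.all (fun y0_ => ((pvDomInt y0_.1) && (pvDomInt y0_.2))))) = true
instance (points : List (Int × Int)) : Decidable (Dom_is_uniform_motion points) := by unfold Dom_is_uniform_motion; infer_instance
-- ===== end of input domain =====

-- B checks each coordinate sequence separately with a running-state scan instead of A's velocity list + adjacent scan (alternative decomposition, same O(n) cost).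


-- ===== PORT A =====
def calculate_velocity (point1 point2 : Int × Int) : Int × Int :=
  (point2.1 - point1.1, point2.2 - point1.2)

-- the second loop of A (scan velocities[i] vs velocities[i+1], early return False)
def pvCheckVel : List (Int × Int) → Bool
  | v1 :: v2 :: rest =>
      if |v1.1 - v2.1| > 5 || |v1.2 - v2.2| > 5 then false
      else pvCheckVel (v2 :: rest)
  | _ => true
termination_by l => l.length

def is_uniform_motion (points : List (Int × Int)) : Bool :=
  if points.length < 3 then true
  else
    let velocities := (List.range (points.length - 1)).map
      (fun i => calculate_velocity (points.getD i (0, 0)) (points.getD (i + 1) (0, 0)))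
    pvCheckVel velocities

-- ===== PORT B =====
-- one iteration of B's inner loop: state = (ok, prev, prev_d)
def steadyStep (st : Bool × Option Int × Option Int) (v : Int) : Bool × Option Int × Option Int :=
  match st with
  | (ok, prev, prevd) =>
    match prev with
    | none => (ok, some v, prevd)
    | some p =>
      let d := v - p
      let ok' := match prevd with
        | some pd => if |d - pd| > 5 then false else ok
        | none => ok
      (ok', some v, some d)

def steady (seq : List Int) : Bool := (seq.foldl steadyStep (true, none, none)).1

def is_uniform_motion_alt (points : List (Int × Int)) : Bool :=
  steady (points.map Prod.fst) && steady (points.map Prod.snd)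

-- ===== PRECONDITION & SPEC =====
def Spec_is_uniform_motion (points : List (Int × Int)) (out : Bool) : Prop := out = is_uniform_motion_alt points
instance (points : List (Int × Int)) (out : Bool) : Decidable (Spec_is_uniform_motion points out) := by unfold Spec_is_uniform_motion; infer_instance

-- ===== CLAIM (what is proved, stated in full; the proofs are below) =====
def Claim_equal_is_uniform_motion : Prop := ∀ (points : List (Int × Int)), Dom_is_uniform_motion points → Spec_is_uniform_motion points (is_uniform_motion points)

-- ===== LEMMAS AND PROOFS =====

-- recursive characterisation of B's scan once two values have been seen
def chk (pd p : Int) : List Int → Bool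
  | [] => true
  | v :: rest => (|v - p - pd| ≤ 5) && chk (v - p) v rest

theorem foldl_steady (seq : List Int) : ∀ (ok : Bool) (p pd : Int),
    (seq.foldl steadyStep (ok, some p, some pd)).1 = (ok && chk pd p seq) := by
  induction seq with
  | nil => intro ok p pd; simp [chk]
  | cons v rest ih =>
    intro ok p pd
    simp only [List.foldl_cons, steadyStep, chk]
    by_cases h : |v - p - pd| > 5
    · simp [h, ih, not_le.mpr h]
    · simp [h, ih, not_lt.mp h]

theorem steady_cons2 (a b : Int) (rest : List Int) :
    steady (a :: b :: rest) = chk (b - a) b rest := by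
  simp [steady, steadyStep, foldl_steady]

theorem check_eq_chk : ∀ (a b : Int × Int) (rest : List (Int × Int)),
    pvCheckVel (List.zipWith calculate_velocity (a :: b :: rest) (b :: rest))
      = (chk (b.1 - a.1) b.1 (rest.map Prod.fst) && chk (b.2 - a.2) b.2 (rest.map Prod.snd)) := by
  intro a b rest
  induction rest generalizing a b with
  | nil => simp [pvCheckVel, chk]
  | cons c rest ih =>
    simp only [List.zipWith_cons_cons, List.map_cons, calculate_velocity] at ih ⊢
    rw [pvCheckVel, chk, chk]
    have e1 : |b.1 - a.1 - (c.1 - b.1)| = |c.1 - b.1 - (b.1 - a.1)| := abs_sub_comm _ _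
    have e2 : |b.2 - a.2 - (c.2 - b.2)| = |c.2 - b.2 - (b.2 - a.2)| := abs_sub_comm _ _
    by_cases h1 : |c.1 - b.1 - (b.1 - a.1)| ≤ 5 <;> by_cases h2 : |c.2 - b.2 - (b.2 - a.2)| ≤ 5
    · rw [if_neg (by simp [e1, e2, h1, h2]), ih b c]
      simp [h1, h2]
    · rw [if_pos (by simp [e2]; omega)]; simp [h2]
    · rw [if_pos (by simp [e1]; omega)]; simp [h1]
    · rw [if_pos (by simp [e1]; omega)]; simp [h1]

-- A's first loop builds exactly the zipWith of adjacent points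
theorem velocities_eq (l : List (Int × Int)) :
    (List.range (l.length - 1)).map
      (fun i => calculate_velocity (l.getD i (0, 0)) (l.getD (i + 1) (0, 0)))
      = List.zipWith calculate_velocity l l.tail := by
  induction l with
  | nil => simp
  | cons x xs ih =>
    cases xs with
    | nil => simp
    | cons y ys =>
      simp only [List.length_cons, Nat.add_sub_cancel, List.range_succ_eq_map,
        List.map_cons, List.map_map, List.tail_cons, List.zipWith_cons_cons]
      congr 1

theorem alt_short (l : List (Int × Int)) (h : l.length < 3) : is_uniform_motion_alt l = true := by
  match l with
  | [] => simp [is_uniform_motion_alt, steady]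
  | [a] => simp [is_uniform_motion_alt, steady, steadyStep]
  | [a, b] => simp [is_uniform_motion_alt, steady_cons2, chk]
  | a :: b :: c :: rest => exact absurd h (by simp)

-- ===== VERDICT (by name: the statement is the Claim_ definition above) =====
theorem is_uniform_motion_spec : Claim_equal_is_uniform_motion := by
  intro points _
  unfold Spec_is_uniform_motion is_uniform_motion
  split
  · exact (alt_short points (by assumption)).symm
  · rename_i h
    obtain ⟨a, b, c, rest, rfl⟩ : ∃ a b c rest, points = a :: b :: c :: rest := by
      match points with
      | [] => simp at h
      | [_] => simp at h
      | [_, _] => simp at h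
      | a :: b :: c :: rest => exact ⟨a, b, c, rest, rfl⟩
    simp only [velocities_eq, List.tail_cons, check_eq_chk,
      is_uniform_motion_alt, List.map_cons, steady_cons2]
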